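-- pv_equiv track=rewrite | github.com/SeverinoDaDalt/tfm_severino_da_dalt | code/utils.py | _generate_onehots
-- ===== SOURCE A (Python) =====
-- def _generate_onehots(current, pos, n, min_, max_):
--     """
--     Used in recursion of "generate_onehots".
--     """
--     to_return = []
--     if pos == n:
--         if sum(current) >= min_ and sum(current) <= max_:
--             return []
--         return [current]
--     to_return += _generate_onehots(current + [0], pos + 1, n, min_, max_)
--     to_return += _generate_onehots(current + [1], pos + 1, n, min_, max_)
--     return to_return
-- ===== SOURCE B (Python) =====
-- def _generate_onehots(current, pos, n, min_, max_):
--     combos = [current]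
--     for _ in range(n - pos):
--         combos = [c + [b] for c in combos for b in (0, 1)]
--     return [c for c in combos if not (min_ <= sum(c) <= max_)]
-- ===== Notes on version B (the rewrite author's own statement) =====
-- stated objective: alternative
-- what changed: Replaced A's depth-first two-branch recursion (which filters at each leaf) by an iterative level-by-level product construction: combos starts at [current], each of the n-pos rounds extends every combo by 0 then by 1, and a single final filter keeps vectors whose sum is outside [min_, max_].
import Mathlib
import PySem

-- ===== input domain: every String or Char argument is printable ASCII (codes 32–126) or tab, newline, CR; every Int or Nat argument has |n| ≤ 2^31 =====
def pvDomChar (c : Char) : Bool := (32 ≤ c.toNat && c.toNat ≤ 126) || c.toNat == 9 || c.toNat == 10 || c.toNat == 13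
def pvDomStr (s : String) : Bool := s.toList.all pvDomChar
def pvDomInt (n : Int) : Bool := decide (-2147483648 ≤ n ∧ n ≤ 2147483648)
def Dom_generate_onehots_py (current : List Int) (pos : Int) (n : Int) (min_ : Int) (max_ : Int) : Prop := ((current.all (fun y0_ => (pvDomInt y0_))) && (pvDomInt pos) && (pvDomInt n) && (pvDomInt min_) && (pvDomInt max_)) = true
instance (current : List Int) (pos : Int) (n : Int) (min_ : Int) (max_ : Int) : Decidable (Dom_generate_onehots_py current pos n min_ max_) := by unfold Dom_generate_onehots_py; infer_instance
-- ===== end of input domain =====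

-- B replaces A's depth-first two-branch recursion by an iterative level-by-level product build
-- followed by a single filter pass (objective: alternative decomposition, same cost).

-- ===== PORT A =====
-- A recurses on pos+1 until pos == n; fuel (n - pos).toNat makes that recursion structural.
-- The fuel-0/pos ≠ n branch is unreachable under Pre_ (pos ≤ n); in Python A then recurses forever.
def pvGoA (min_ max_ : Int) : Nat → List Int → Int → Int → List (List Int)
  | fuel, current, pos, n =>
    if pos = n then
      if min_ ≤ current.sum ∧ current.sum ≤ max_ then [] else [current]
    else
      match fuel with
      | 0 => []
      | k+1 =>
        pvGoA min_ max_ k (current ++ [0]) (pos + 1) n ++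
        pvGoA min_ max_ k (current ++ [1]) (pos + 1) n

def generate_onehots_py (current : List Int) (pos : Int) (n : Int) (min_ : Int) (max_ : Int) : List (List Int) :=
  pvGoA min_ max_ (n - pos).toNat current pos n

-- ===== PORT B =====
-- combos starts at [current]; each of the n-pos rounds extends every combo by 0 then by 1;
-- one final filter keeps the vectors whose sum lies outside [min_, max_].
def generate_onehots_py_alt (current : List Int) (pos : Int) (n : Int) (min_ : Int) (max_ : Int) : List (List Int) :=
  let combos :=
    (List.range (n - pos).toNat).foldl
      (fun cs _ => cs.flatMap (fun c => [c ++ [0], c ++ [1]])) [current]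
  combos.filter (fun c => !(decide (min_ ≤ c.sum) && decide (c.sum ≤ max_)))

-- ===== PRECONDITION & SPEC =====
-- Pre_ excludes exactly pos > n, where Python A recurses forever (RecursionError).
def Pre_generate_onehots_py (current : List Int) (pos : Int) (n : Int) (min_ : Int) (max_ : Int) : Prop := pos ≤ n
instance (current : List Int) (pos : Int) (n : Int) (min_ : Int) (max_ : Int) : Decidable (Pre_generate_onehots_py current pos n min_ max_) := by unfold Pre_generate_onehots_py; infer_instance
def pvWitness_generate_onehots_py : List Int × Int × Int × Int × Int := ([], 0, 2, 1, 1)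

def Spec_generate_onehots_py (current : List Int) (pos : Int) (n : Int) (min_ : Int) (max_ : Int) (out : List (List Int)) : Prop := out = generate_onehots_py_alt current pos n min_ max_
instance (current : List Int) (pos : Int) (n : Int) (min_ : Int) (max_ : Int) (out : List (List Int)) : Decidable (Spec_generate_onehots_py current pos n min_ max_ out) := by unfold Spec_generate_onehots_py; infer_instance

-- ===== CLAIM (what is proved, stated in full; the proofs are below) =====
def Claim_equal_generate_onehots_py : Prop := ∀ (current : List Int) (pos : Int) (n : Int) (min_ : Int) (max_ : Int), Dom_generate_onehots_py current pos n min_ max_ → Pre_generate_onehots_py current pos n min_ max_ → Spec_generate_onehots_py current pos n min_ max_ (generate_onehots_py current pos n min_ max_)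

-- ===== LEMMAS AND PROOFS =====

-- one extension round, as B's fold body applies it
def pvStep (cs : List (List Int)) : List (List Int) :=
  cs.flatMap (fun c => [c ++ [0], c ++ [1]])

lemma pvFold_eq_step (k : Nat) (l : List (List Int)) :
    (List.range (k+1)).foldl (fun cs _ => pvStep cs) l
      = (List.range k).foldl (fun cs _ => pvStep cs) (pvStep l) := by
  simp [List.range_succ_eq_map, List.foldl_map]

lemma pvFold_append (k : Nat) (xs ys : List (List Int)) :
    (List.range k).foldl (fun cs _ => pvStep cs) (xs ++ ys)
      = (List.range k).foldl (fun cs _ => pvStep cs) xs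
        ++ (List.range k).foldl (fun cs _ => pvStep cs) ys := by
  induction k generalizing xs ys with
  | zero => simp
  | succ k ih =>
    rw [pvFold_eq_step, pvFold_eq_step, pvFold_eq_step]
    rw [show pvStep (xs ++ ys) = pvStep xs ++ pvStep ys from List.flatMap_append]
    exact ih _ _

lemma pvGoA_eq (min_ max_ : Int) (k : Nat) :
    ∀ (current : List Int) (pos n : Int), pos + k = n →
    pvGoA min_ max_ k current pos n
      = ((List.range k).foldl (fun cs _ => pvStep cs) [current]).filter
          (fun c => !(decide (min_ ≤ c.sum) && decide (c.sum ≤ max_))) := by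
  induction k with
  | zero =>
    intro current pos n h
    have hpn : pos = n := by omega
    by_cases hs : min_ ≤ current.sum ∧ current.sum ≤ max_
    · simp [pvGoA, hpn, List.filter, hs]
    · have hb : (!decide (min_ ≤ current.sum) || !decide (current.sum ≤ max_)) = true := by
        rcases not_and_or.mp hs with h | h <;> simp [h]
      simp [pvGoA, hpn, List.filter, hb]
      push_neg at hs
      exact hs
  | succ k ih =>
    intro current pos n h
    have hne : pos ≠ n := by omega
    have h0 : (pos + 1) + (k : Int) = n := by push_cast at h ⊢; omega
    rw [show pvGoA min_ max_ (k+1) current pos n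
          = pvGoA min_ max_ k (current ++ [0]) (pos + 1) n
            ++ pvGoA min_ max_ k (current ++ [1]) (pos + 1) n from by
        rw [pvGoA]; simp [hne]]
    rw [ih _ _ _ h0, ih _ _ _ h0, ← List.filter_append, pvFold_eq_step]
    rw [show pvStep [current] = [current ++ [0]] ++ [current ++ [1]] from by
        simp [pvStep]]
    rw [pvFold_append]

-- ===== VERDICT (by name: the statement is the Claim_ definition above) =====
theorem generate_onehots_py_spec : Claim_equal_generate_onehots_py := by
  intro current pos n min_ max_ _ hpre
  unfold Spec_generate_onehots_py generate_onehots_py generate_onehots_py_alt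
  have hk : pos + ((n - pos).toNat : Int) = n := by
    have : (0:Int) ≤ n - pos := by exact sub_nonneg.mpr hpre
    omega
  simpa [pvStep] using pvGoA_eq min_ max_ (n - pos).toNat current pos n hk
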